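-- pv_equiv track=rewrite | github.com/Ar-Kareem/PythonDice | randvar.py | _sort_and_group
-- ===== SOURCE A (Python) =====
-- from typing import Sequence, Iterable
--
-- def _sort_and_group(vals, probs: Sequence[int]):
--   zipped = sorted(zip(vals, probs), reverse=True)
--   newzipped: list[tuple[float, int]] = []
--   for i in range(len(zipped)-1, -1, -1):
--     if i > 0 and zipped[i][0] == zipped[i-1][0]: # add the two probs, go to next
--       zipped[i-1] = (zipped[i-1][0], zipped[i-1][1]+zipped[i][1])
--     else:
--       newzipped.append(zipped[i])
--   vals = tuple(v[0] for v in newzipped)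
--   probs = tuple(v[1] for v in newzipped)
--   return vals, probs
-- ===== SOURCE B (Python) =====
-- def _sort_and_group(vals, probs):
--   d = {}
--   for v, p in zip(vals, probs):
--     d[v] = d.get(v, 0) + p
--   items = sorted(d.items())
--   return tuple(k for k, _ in items), tuple(s for _, s in items)
-- ===== Notes on version B (the rewrite author's own statement) =====
-- stated objective: simpler
-- what changed: Replaces A's sort-all-pairs-descending followed by a backwards index loop that mutates the list to merge adjacent equal values with a one-pass dict aggregation (d[v] = d.get(v,0)+p) followed by sorting only the unique items; the adjacent-comparison merge loop disappears.
import Mathlib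
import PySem

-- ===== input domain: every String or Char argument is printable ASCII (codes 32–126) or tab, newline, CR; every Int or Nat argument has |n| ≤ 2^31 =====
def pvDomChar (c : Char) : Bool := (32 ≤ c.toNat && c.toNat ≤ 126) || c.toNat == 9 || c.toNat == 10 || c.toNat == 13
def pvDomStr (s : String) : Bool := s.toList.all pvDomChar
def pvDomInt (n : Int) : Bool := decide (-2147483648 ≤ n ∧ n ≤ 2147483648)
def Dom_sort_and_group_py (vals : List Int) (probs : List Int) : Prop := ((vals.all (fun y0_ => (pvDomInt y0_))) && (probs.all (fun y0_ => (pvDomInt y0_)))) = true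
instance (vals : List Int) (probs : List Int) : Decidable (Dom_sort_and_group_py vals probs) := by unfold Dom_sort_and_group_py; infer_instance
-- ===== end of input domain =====

-- B replaces A's sort-all-pairs + backwards adjacent-merge loop by a one-pass dict
-- aggregation followed by a sort of the unique items (objective: simpler).

-- ===== PORT A =====
-- A's backwards index loop (i = len-1 … 0) walks the descending-sorted list from its
-- last element upward, i.e. it consumes `zipped.reverse` front to back; the in-place
-- update `zipped[i-1] = (v, p+p')` becomes carrying the updated next pair in the
-- recursion; `newzipped.append` becomes cons in the same (ascending) order.
def pvMergeA : List (Int × Int) → List (Int × Int)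
  | [] => []
  | [x] => [x]
  | x :: y :: rest =>
      if x.1 = y.1 then pvMergeA ((y.1, y.2 + x.2) :: rest)
      else x :: pvMergeA (y :: rest)
termination_by l => l.length

def sort_and_group_py (vals : List Int) (probs : List Int) : List Int × List Int :=
  let zipped := PySem.List.sorted2 (vals.zip probs) Prod.fst Prod.snd true
  let newzipped := pvMergeA zipped.reverse
  (newzipped.map Prod.fst, newzipped.map Prod.snd)

-- ===== PORT B =====
def pvAgg (L : List (Int × Int)) : PySem.Dict Int Int :=
  L.foldl (fun d p => d.insert p.1 (d.getD p.1 0 + p.2)) PySem.Dict.empty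

def sort_and_group_py_alt (vals : List Int) (probs : List Int) : List Int × List Int :=
  let items := PySem.List.sorted2 (pvAgg (vals.zip probs)).items Prod.fst Prod.snd false
  (items.map Prod.fst, items.map Prod.snd)

-- ===== PRECONDITION & SPEC =====
def Spec_sort_and_group_py (vals : List Int) (probs : List Int) (out : List Int × List Int) : Prop := out = sort_and_group_py_alt vals probs
instance (vals : List Int) (probs : List Int) (out : List Int × List Int) : Decidable (Spec_sort_and_group_py vals probs out) := by unfold Spec_sort_and_group_py; infer_instance

-- ===== CLAIM (what is proved, stated in full; the proofs are below) =====
def Claim_equal_sort_and_group_py : Prop := ∀ (vals : List Int) (probs : List Int), Dom_sort_and_group_py vals probs → Spec_sort_and_group_py vals probs (sort_and_group_py vals probs)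

-- ===== LEMMAS AND PROOFS =====

/-- Total prob mass carried by key `k` in the pair list `L`. -/
def pvSum (L : List (Int × Int)) (k : Int) : Int :=
  ((L.filter (fun p => p.1 == k)).map Prod.snd).sum

lemma pvSum_perm {L L' : List (Int × Int)} (h : L.Perm L') (k : Int) :
    pvSum L k = pvSum L' k := by
  unfold pvSum
  exact ((h.filter _).map Prod.snd).sum_eq

lemma pairwise_insertBy {α : Type} (before : α → α → Bool) (R : α → α → Prop)
    (htrans : ∀ a b c, R a b → R b c → R a c)
    (h1 : ∀ a b, before a b = true → R a b)
    (h2 : ∀ a b, before a b = false → R b a)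
    (x : α) : ∀ (ys : List α), ys.Pairwise R → (PySem.List.insertBy before x ys).Pairwise R
  | [], _ => by simp [PySem.List.insertBy]
  | y :: ys, hp => by
    simp only [PySem.List.insertBy]
    rcases List.pairwise_cons.mp hp with ⟨hy, hys⟩
    by_cases hb : before x y = true
    · simp only [hb, if_true]
      refine List.pairwise_cons.mpr ⟨?_, hp⟩
      intro z hz
      rcases List.mem_cons.mp hz with rfl | hz
      · exact h1 _ _ hb
      · exact htrans _ _ _ (h1 _ _ hb) (hy _ hz)
    · simp only [hb]
      refine List.pairwise_cons.mpr ⟨?_, pairwise_insertBy before R htrans h1 h2 x ys hys⟩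
      intro z hz
      rcases (PySem.List.mem_insertBy before x z ys).mp hz with rfl | hz
      · exact h2 _ _ (by simpa using hb)
      · exact hy _ hz

lemma pairwise_foldl_insertBy {α : Type} (before : α → α → Bool) (R : α → α → Prop)
    (htrans : ∀ a b c, R a b → R b c → R a c)
    (h1 : ∀ a b, before a b = true → R a b)
    (h2 : ∀ a b, before a b = false → R b a) :
    ∀ (xs acc : List α), acc.Pairwise R →
      (xs.foldl (fun acc x => PySem.List.insertBy before x acc) acc).Pairwise R
  | [], acc, hacc => hacc
  | x :: xs, acc, hacc => by
    simp only [List.foldl_cons]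
    exact pairwise_foldl_insertBy before R htrans h1 h2 xs _
      (pairwise_insertBy before R htrans h1 h2 x acc hacc)

lemma sorted2_rev_pairwise_fst (xs : List (Int × Int)) :
    (PySem.List.sorted2 xs Prod.fst Prod.snd true).Pairwise
      (fun a b : Int × Int => b.1 ≤ a.1) := by
  have hdef : PySem.List.sorted2 xs Prod.fst Prod.snd true
      = xs.foldl (fun acc x => PySem.List.insertBy
          (fun a b : Int × Int => decide (b.1 < a.1) || (!decide (a.1 < b.1) && decide (b.2 < a.2)))
          x acc) [] := rfl
  rw [hdef]
  refine pairwise_foldl_insertBy _ _ ?_ ?_ ?_ xs [] List.Pairwise.nil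
  · intro a b c hab hbc; exact le_trans hbc hab
  · intro a b h
    simp only [Bool.or_eq_true, decide_eq_true_eq, Bool.and_eq_true,
      Bool.not_eq_true', decide_eq_false_iff_not] at h
    rcases h with h | ⟨h, _⟩
    · exact le_of_lt h
    · exact le_of_not_gt h
  · intro a b h
    simp only [Bool.or_eq_false_iff, decide_eq_false_iff_not, Bool.and_eq_false_iff,
      Bool.not_eq_false', decide_eq_true_eq] at h
    exact le_of_not_gt h.1

lemma sorted2_pairwise_fst (xs : List (Int × Int)) :
    (PySem.List.sorted2 xs Prod.fst Prod.snd false).Pairwise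
      (fun a b : Int × Int => a.1 ≤ b.1) := by
  have hdef : PySem.List.sorted2 xs Prod.fst Prod.snd false
      = xs.foldl (fun acc x => PySem.List.insertBy
          (fun a b : Int × Int => decide (a.1 < b.1) || (!decide (b.1 < a.1) && decide (a.2 < b.2)))
          x acc) [] := rfl
  rw [hdef]
  refine pairwise_foldl_insertBy _ _ ?_ ?_ ?_ xs [] List.Pairwise.nil
  · intro a b c hab hbc; exact le_trans hab hbc
  · intro a b h
    simp only [Bool.or_eq_true, decide_eq_true_eq, Bool.and_eq_true,
      Bool.not_eq_true', decide_eq_false_iff_not] at h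
    rcases h with h | ⟨h, _⟩
    · exact le_of_lt h
    · exact le_of_not_gt h
  · intro a b h
    simp only [Bool.or_eq_false_iff, decide_eq_false_iff_not, Bool.and_eq_false_iff,
      Bool.not_eq_false', decide_eq_true_eq] at h
    exact le_of_not_gt h.1

lemma pvSum_cons (a b : Int) (t : List (Int × Int)) (k : Int) :
    pvSum ((a, b) :: t) k = (if a = k then b else 0) + pvSum t k := by
  by_cases h : a = k
  · simp [pvSum, h]
  · simp [pvSum, h]

lemma pvSum_eq_zero_of_not_mem (t : List (Int × Int)) (k : Int)
    (h : k ∉ t.map Prod.fst) : pvSum t k = 0 := by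
  have : t.filter (fun p => p.1 == k) = [] := by
    rw [List.filter_eq_nil_iff]
    intro p hp
    simp only [beq_iff_eq]
    intro hk
    exact h (List.mem_map.mpr ⟨p, hp, hk⟩)
  simp [pvSum, this]

/-- Characterisation of A's merge loop on a list whose keys are nondecreasing:
membership and strict key-sortedness of the result. -/
lemma pvMergeA_char : ∀ (z : List (Int × Int)),
    z.Pairwise (fun a b => a.1 ≤ b.1) →
    (∀ p : Int × Int, p ∈ pvMergeA z ↔ p.1 ∈ z.map Prod.fst ∧ p.2 = pvSum z p.1) ∧
    (pvMergeA z).Pairwise (fun a b => a.1 < b.1) := by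
  intro z
  induction z using pvMergeA.induct with
  | case1 =>
    intro _
    refine ⟨fun p => ?_, by simp [pvMergeA]⟩
    simp [pvMergeA]
  | case2 x =>
    intro _
    refine ⟨fun p => ?_, by simp [pvMergeA]⟩
    obtain ⟨a, b⟩ := x
    obtain ⟨pk, pv⟩ := p
    simp only [pvMergeA, List.mem_singleton, List.map_cons, List.map_nil, Prod.mk.injEq]
    constructor
    · rintro ⟨rfl, rfl⟩
      simp [pvSum]
    · rintro ⟨hk, hv⟩
      subst hk
      rw [pvSum_cons] at hv
      simp [pvSum] at hv
      exact ⟨rfl, hv⟩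
  | case3 x y rest heq ih =>
    intro hp
    have htail : (y :: rest).Pairwise (fun a b => a.1 ≤ b.1) := (List.pairwise_cons.mp hp).2
    have hyr : ∀ q ∈ rest, y.1 ≤ q.1 := (List.pairwise_cons.mp htail).1
    have hp' : ((y.1, y.2 + x.2) :: rest).Pairwise (fun a b => a.1 ≤ b.1) :=
      List.pairwise_cons.mpr ⟨fun q hq => hyr q hq, htail.of_cons⟩
    obtain ⟨ihm, ihs⟩ := ih hp'
    have hstep : pvMergeA (x :: y :: rest) = pvMergeA ((y.1, y.2 + x.2) :: rest) := by
      simp [pvMergeA, heq]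
    have hsum : ∀ k, pvSum (x :: y :: rest) k = pvSum ((y.1, y.2 + x.2) :: rest) k := by
      intro k
      obtain ⟨a, b⟩ := x
      obtain ⟨c, d⟩ := y
      simp only at heq
      subst heq
      rw [pvSum_cons, pvSum_cons, pvSum_cons]
      split_ifs <;> ring
    refine ⟨fun p => ?_, hstep ▸ ihs⟩
    have hkeys : (p.1 ∈ (x :: y :: rest).map Prod.fst)
        ↔ p.1 ∈ ((y.1, y.2 + x.2) :: rest).map Prod.fst := by
      simp only [List.map_cons, List.mem_cons]
      constructor
      · rintro (h | h | h)
        · exact Or.inl (heq ▸ h)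
        · exact Or.inl h
        · exact Or.inr h
      · rintro (h | h)
        · exact Or.inl (h.trans heq.symm)
        · exact Or.inr (Or.inr h)
    rw [hstep, ihm p, hsum p.1, hkeys]
  | case4 x y rest hne ih =>
    intro hp
    have hxy : x.1 ≤ y.1 := (List.pairwise_cons.mp hp).1 y List.mem_cons_self
    have hxylt : x.1 < y.1 := lt_of_le_of_ne hxy hne
    have htail : (y :: rest).Pairwise (fun a b => a.1 ≤ b.1) := (List.pairwise_cons.mp hp).2
    have hall : ∀ q ∈ y :: rest, x.1 < q.1 := by
      intro q hq
      rcases List.mem_cons.mp hq with rfl | hq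
      · exact hxylt
      · exact lt_of_lt_of_le hxylt ((List.pairwise_cons.mp htail).1 q hq)
    obtain ⟨ihm, ihs⟩ := ih htail
    have hstep : pvMergeA (x :: y :: rest) = x :: pvMergeA (y :: rest) := by
      simp [pvMergeA, hne]
    have hxnot : x.1 ∉ (y :: rest).map Prod.fst := by
      intro hmem
      obtain ⟨q, hq, hqk⟩ := List.mem_map.mp hmem
      exact absurd hqk (ne_of_gt (hall q hq))
    constructor
    · intro p
      rw [hstep]
      simp only [List.mem_cons]
      constructor
      · rintro (rfl | hmem)
        · refine ⟨by simp, ?_⟩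
          obtain ⟨a, b⟩ := p
          rw [pvSum_cons, if_pos rfl, pvSum_eq_zero_of_not_mem _ _ hxnot]
          simp
        · obtain ⟨hk, hv⟩ := (ihm p).mp hmem
          have hpk : p.1 ≠ x.1 := by
            obtain ⟨q, hq, hqk⟩ := List.mem_map.mp hk
            exact hqk ▸ ne_of_gt (hall q hq)
          refine ⟨by rw [List.map_cons]; exact List.mem_cons_of_mem _ hk, ?_⟩
          obtain ⟨a, b⟩ := x
          rw [pvSum_cons, if_neg (fun h => hpk h.symm)]
          omega
      · rintro ⟨hk, hv⟩
        rw [List.map_cons, List.mem_cons] at hk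
        rcases hk with hk | hk
        · left
          obtain ⟨a, b⟩ := x
          obtain ⟨pk, pv⟩ := p
          simp only at hk
          subst hk
          rw [pvSum_cons, if_pos rfl, pvSum_eq_zero_of_not_mem _ _ hxnot] at hv
          simp only [add_zero] at hv
          simp [hv]
        · right
          have hpk : p.1 ≠ x.1 := by
            obtain ⟨q, hq, hqk⟩ := List.mem_map.mp hk
            exact hqk ▸ ne_of_gt (hall q hq)
          refine (ihm p).mpr ⟨hk, ?_⟩
          obtain ⟨a, b⟩ := x
          rw [pvSum_cons, if_neg (fun h => hpk h.symm)] at hv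
          omega
    · rw [hstep]
      refine List.pairwise_cons.mpr ⟨?_, ihs⟩
      intro q hq
      obtain ⟨hk, _⟩ := (ihm q).mp hq
      obtain ⟨r, hr, hrk⟩ := List.mem_map.mp hk
      exact hrk ▸ hall r hr

lemma pvAgg_getD_aux : ∀ (L : List (Int × Int)) (d : PySem.Dict Int Int) (k : Int),
    (L.foldl (fun d p => d.insert p.1 (d.getD p.1 0 + p.2)) d).getD k 0
      = d.getD k 0 + pvSum L k
  | [], d, k => by simp [pvSum]
  | p :: rest, d, k => by
    simp only [List.foldl_cons]
    rw [pvAgg_getD_aux rest _ k]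
    obtain ⟨a, b⟩ := p
    rw [pvSum_cons]
    by_cases h : k = a
    · subst h
      rw [PySem.Dict.getD_insert, if_pos rfl, if_pos rfl]
      ring
    · rw [PySem.Dict.getD_insert, if_neg h, if_neg (fun hh => h hh.symm)]
      ring

/-- value of the aggregation dict at any key -/
lemma pvAgg_getD (L : List (Int × Int)) (k : Int) :
    (pvAgg L).getD k 0 = pvSum L k := by
  unfold pvAgg
  rw [pvAgg_getD_aux]
  simp

lemma pvAgg_nodup (L : List (Int × Int)) : (pvAgg L).keys.Nodup := by
  unfold pvAgg
  exact PySem.Dict.nodup_keys_foldl_insert_key L Prod.fst _ _ PySem.Dict.nodup_keys_empty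

lemma pvAgg_mem_keys (L : List (Int × Int)) (k : Int) :
    k ∈ (pvAgg L).keys ↔ k ∈ L.map Prod.fst := by
  unfold pvAgg
  rw [PySem.Dict.keys_foldl_insert_key]
  simp [PySem.Set.mem_update, PySem.Dict.keys_empty]

lemma pvAgg_mem_items (L : List (Int × Int)) (p : Int × Int) :
    p ∈ (pvAgg L).items ↔ p.1 ∈ L.map Prod.fst ∧ p.2 = pvSum L p.1 := by
  have hnd := pvAgg_nodup L
  constructor
  · intro hmem
    have hk : p.1 ∈ (pvAgg L).keys := PySem.Dict.mem_keys_of_mem_items _ hmem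
    have hget : (pvAgg L).get? p.1 = some p.2 :=
      ((PySem.Dict.get?_eq_some_iff_mem_items _ _ _ hnd).mpr (by simpa using hmem))
    have hgd := PySem.Dict.getD_of_get?_eq_some _ 0 hget
    exact ⟨(pvAgg_mem_keys L p.1).mp hk, by rw [← pvAgg_getD L p.1, hgd]⟩
  · rintro ⟨hk, hv⟩
    have hk' : p.1 ∈ (pvAgg L).keys := (pvAgg_mem_keys L p.1).mpr hk
    obtain ⟨w, hw⟩ : ∃ w, (pvAgg L).get? p.1 = some w := by
      cases hget : (pvAgg L).get? p.1 with
      | none => exact absurd ((PySem.Dict.get?_eq_none_iff_not_mem_keys _ _).mp hget) (by simpa using hk')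
      | some w => exact ⟨w, rfl⟩
    have hwv : w = p.2 := by
      have hgd := PySem.Dict.getD_of_get?_eq_some _ 0 hw
      rw [pvAgg_getD L p.1] at hgd
      omega
    subst hwv
    have := (PySem.Dict.get?_eq_some_iff_mem_items _ _ _ hnd).mp hw
    simpa using this

/-- two key-strictly-sorted pair lists with the same members are equal -/
lemma pv_eq_of_mem_iff : ∀ (l1 l2 : List (Int × Int)),
    l1.Pairwise (fun a b => a.1 < b.1) → l2.Pairwise (fun a b => a.1 < b.1) →
    (∀ p, p ∈ l1 ↔ p ∈ l2) → l1 = l2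
  | [], [], _, _, _ => rfl
  | [], b :: t2, _, _, hm => absurd ((hm b).mpr List.mem_cons_self) (List.not_mem_nil)
  | a :: t1, [], _, _, hm => absurd ((hm a).mp List.mem_cons_self) (List.not_mem_nil)
  | a :: t1, b :: t2, h1, h2, hm => by
    have hab : a = b := by
      by_contra hne
      have ha2 : a ∈ t2 := by
        rcases List.mem_cons.mp ((hm a).mp List.mem_cons_self) with h | h
        · exact absurd h hne
        · exact h
      have hb1 : b ∈ t1 := by
        rcases List.mem_cons.mp ((hm b).mpr List.mem_cons_self) with h | h
        · exact absurd h.symm hne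
        · exact h
      have hba : b.1 < a.1 := (List.pairwise_cons.mp h2).1 a ha2
      have hab2 : a.1 < b.1 := (List.pairwise_cons.mp h1).1 b hb1
      exact absurd hab2 (not_lt.mpr hba.le)
    subst hab
    have hm' : ∀ p, p ∈ t1 ↔ p ∈ t2 := by
      intro p
      constructor
      · intro hp
        have hlt := (List.pairwise_cons.mp h1).1 p hp
        rcases List.mem_cons.mp ((hm p).mp (List.mem_cons_of_mem _ hp)) with h | h
        · rw [h] at hlt; exact absurd hlt (lt_irrefl _)
        · exact h
      · intro hp
        have hlt := (List.pairwise_cons.mp h2).1 p hp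
        rcases List.mem_cons.mp ((hm p).mpr (List.mem_cons_of_mem _ hp)) with h | h
        · rw [h] at hlt; exact absurd hlt (lt_irrefl _)
        · exact h
    rw [pv_eq_of_mem_iff t1 t2 (List.pairwise_cons.mp h1).2 (List.pairwise_cons.mp h2).2 hm']

-- ===== VERDICT (by name: the statement is the Claim_ definition above) =====
theorem sort_and_group_py_spec : Claim_equal_sort_and_group_py := by
  intro vals probs _
  unfold Spec_sort_and_group_py sort_and_group_py sort_and_group_py_alt
  dsimp only
  set L := vals.zip probs with hL
  set z := (PySem.List.sorted2 L Prod.fst Prod.snd true).reverse with hz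
  have hzperm : z.Perm L := (List.reverse_perm _).trans (PySem.List.sorted2_perm L _ _ true)
  have hzsort : z.Pairwise (fun a b : Int × Int => a.1 ≤ b.1) := by
    rw [hz, List.pairwise_reverse]
    exact sorted2_rev_pairwise_fst L
  obtain ⟨hmemA, hsortA⟩ := pvMergeA_char z hzsort
  set S := PySem.List.sorted2 (pvAgg L).items Prod.fst Prod.snd false with hS
  have hSperm : S.Perm (pvAgg L).items := PySem.List.sorted2_perm _ _ _ false
  have hSsort : S.Pairwise (fun a b : Int × Int => a.1 < b.1) := by
    have hle := sorted2_pairwise_fst (pvAgg L).items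
    have hnd : (S.map Prod.fst).Nodup := (hSperm.map Prod.fst).nodup_iff.mpr (pvAgg_nodup L)
    have hne : S.Pairwise (fun a b : Int × Int => a.1 ≠ b.1) :=
      (List.pairwise_map.mp hnd)
    exact (hle.and hne).imp (fun h => lt_of_le_of_ne h.1 h.2)
  have hmain : pvMergeA z = S := by
    refine (pv_eq_of_mem_iff _ _ hsortA hSsort ?_)
    intro p
    rw [hmemA p, hSperm.mem_iff, pvAgg_mem_items L p]
    constructor
    · rintro ⟨hk, hs⟩
      exact ⟨(hzperm.map Prod.fst).mem_iff.mp hk, by rw [hs, pvSum_perm hzperm]⟩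
    · rintro ⟨hk, hs⟩
      exact ⟨(hzperm.map Prod.fst).mem_iff.mpr hk, by rw [hs, pvSum_perm hzperm]⟩
  rw [hmain]
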